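-- pv_equiv track=rewrite | github.com/agucova/cs42 | rúbricas/i1/numeros_introescos.py | digito
-- ===== SOURCE A (Python) =====
-- def digito(x, i):
--     contador = largo(x) - 1
--     while x != 0:
--         if i == contador:
--             return x % 10
--         contador -= 1
--         x = x // 10
--     return -1
--
-- def largo(x):
--     contador = 0
--     while x != 0:
--         x = x // 10
--         contador += 1
--     return contador
-- ===== SOURCE B (Python) =====
-- def digito(x, i):
--     d = 0
--     y = x
--     while y != 0:
--         y //= 10
--         d += 1
--     if i < 0 or i >= d:
--         return -1
--     return (x // 10 ** (d - 1 - i)) % 10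
-- ===== Notes on version B (the rewrite author's own statement) =====
-- stated objective: simpler
-- what changed: B counts the digits once, then extracts digit i with a single arithmetic expression (x // 10**(d-1-i)) % 10 guarded by a range check, instead of A's second countdown scan that divides x digit by digit until the index matches.
import Mathlib
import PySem

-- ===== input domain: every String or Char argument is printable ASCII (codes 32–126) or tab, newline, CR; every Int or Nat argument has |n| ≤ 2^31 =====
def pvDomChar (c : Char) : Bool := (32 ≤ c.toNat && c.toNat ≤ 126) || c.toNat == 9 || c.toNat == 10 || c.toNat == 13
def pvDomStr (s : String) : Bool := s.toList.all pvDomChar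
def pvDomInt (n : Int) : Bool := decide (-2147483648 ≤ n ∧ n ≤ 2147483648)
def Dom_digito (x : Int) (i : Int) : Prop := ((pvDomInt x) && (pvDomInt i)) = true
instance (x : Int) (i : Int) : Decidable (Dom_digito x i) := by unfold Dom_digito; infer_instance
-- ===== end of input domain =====

-- B replaces A's second digit-by-digit countdown scan by a single arithmetic
-- extraction (x // 10**(d-1-i)) % 10 behind a range check (objective: simpler).

-- ===== PORT A =====
-- while loop of `largo`, made total with a fuel bound (fuel ≥ iterations needed on Pre_)
def largoAux (fuel : Nat) (x contador : Int) : Int :=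
  match fuel with
  | 0 => contador
  | f + 1 => if x = 0 then contador else largoAux f (PySem.Int.floordiv x 10) (contador + 1)

def largo (x : Int) : Int := largoAux (x.natAbs + 1) x 0

-- while loop of `digito`, same fuel treatment
def digitoLoop (fuel : Nat) (x i contador : Int) : Int :=
  match fuel with
  | 0 => -1
  | f + 1 =>
    if x = 0 then -1
    else if i = contador then PySem.Int.mod x 10
    else digitoLoop f (PySem.Int.floordiv x 10) i (contador - 1)

def digito (x : Int) (i : Int) : Int := digitoLoop (x.natAbs + 1) x i (largo x - 1)

-- ===== PORT B =====
-- B's digit-count while loop, same fuel treatment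
def digitoAltLen (fuel : Nat) (y d : Int) : Int :=
  match fuel with
  | 0 => d
  | f + 1 => if y = 0 then d else digitoAltLen f (PySem.Int.floordiv y 10) (d + 1)

def digito_alt (x : Int) (i : Int) : Int :=
  let d := digitoAltLen (x.natAbs + 1) x 0
  if i < 0 ∨ d ≤ i then -1
  else PySem.Int.mod (PySem.Int.floordiv x (10 ^ (d - 1 - i).toNat)) 10

-- ===== PRECONDITION & SPEC =====
-- Pre_ excludes negative x, on which both Pythons loop forever (x // 10 never reaches 0).
def Pre_digito (x : Int) (_i : Int) : Prop := 0 ≤ x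
instance (x : Int) (i : Int) : Decidable (Pre_digito x i) := by unfold Pre_digito; infer_instance
def pvWitness_digito : Int × Int := (123, 1)

def Spec_digito (x : Int) (i : Int) (out : Int) : Prop := out = digito_alt x i
instance (x : Int) (i : Int) (out : Int) : Decidable (Spec_digito x i out) := by unfold Spec_digito; infer_instance

-- ===== CLAIM (what is proved, stated in full; the proofs are below) =====
def Claim_equal_digito : Prop := ∀ (x : Int) (i : Int), Dom_digito x i → Pre_digito x i → Spec_digito x i (digito x i)

-- ===== LEMMAS AND PROOFS =====

-- number of decimal digits of a natural number (0 has 0 digits)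
def pvL (n : Nat) : Nat :=
  if h : n = 0 then 0 else pvL (n / 10) + 1
termination_by n
decreasing_by exact Nat.div_lt_self (Nat.pos_of_ne_zero h) (by norm_num)

lemma pvL_pos {n : Nat} (h : n ≠ 0) : pvL n = pvL (n / 10) + 1 := by
  rw [pvL]; simp [h]

lemma largoAux_eq : ∀ (fuel n : Nat) (c : Int), n ≤ fuel →
    largoAux fuel (n : Int) c = c + (pvL n : Int) := by
  intro fuel
  induction fuel with
  | zero =>
    intro n c h
    interval_cases n
    simp [largoAux, pvL]
  | succ f ih =>
    intro n c h
    by_cases hn : n = 0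
    · subst hn; simp [largoAux, pvL]
    · have hne : (n : Int) ≠ 0 := by exact_mod_cast hn
      have hdiv : PySem.Int.floordiv (n : Int) 10 = ((n / 10 : Nat) : Int) := by
        exact_mod_cast PySem.Int.floordiv_natCast n 10
      have hlt : n / 10 ≤ f := by
        have := Nat.div_lt_self (Nat.pos_of_ne_zero hn) (by norm_num : 1 < 10)
        omega
      rw [largoAux, if_neg hne, hdiv, ih (n / 10) (c + 1) hlt, pvL_pos hn]
      push_cast; ring

lemma digitoLoop_eq : ∀ (fuel n : Nat) (i c : Int), n ≤ fuel →
    digitoLoop fuel (n : Int) i c =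
      if i ≤ c ∧ c - i < (pvL n : Int)
      then ((n / 10 ^ (c - i).toNat % 10 : Nat) : Int) else -1 := by
  intro fuel
  induction fuel with
  | zero =>
    intro n i c h
    interval_cases n
    have : ¬ (i ≤ c ∧ c - i < ((pvL 0 : Nat) : Int)) := by simp [pvL]
    simp [digitoLoop, this]
  | succ f ih =>
    intro n i c h
    by_cases hn : n = 0
    · subst hn
      have : ¬ (i ≤ c ∧ c - i < ((pvL 0 : Nat) : Int)) := by simp [pvL]
      simp [digitoLoop, this]
    · have hne : (n : Int) ≠ 0 := by exact_mod_cast hn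
      have hL : pvL n = pvL (n / 10) + 1 := pvL_pos hn
      by_cases hic : i = c
      · subst hic
        have hcond : i ≤ i ∧ i - i < (pvL n : Int) := by
          constructor
          · exact le_refl i
          · simp [hL]
        rw [digitoLoop, if_neg hne, if_pos rfl]
        rw [if_pos hcond]
        simp
      · have hdiv : PySem.Int.floordiv (n : Int) 10 = ((n / 10 : Nat) : Int) := by
          exact_mod_cast PySem.Int.floordiv_natCast n 10
        have hlt : n / 10 ≤ f := by
          have := Nat.div_lt_self (Nat.pos_of_ne_zero hn) (by norm_num : 1 < 10)
          omega
        rw [digitoLoop, if_neg hne, if_neg hic, hdiv, ih (n / 10) i (c - 1) hlt]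
        by_cases hcond : i ≤ c - 1 ∧ c - 1 - i < (pvL (n / 10) : Int)
        · have hcond' : i ≤ c ∧ c - i < (pvL n : Int) := by
            rw [hL]; push_cast; omega
          rw [if_pos hcond, if_pos hcond']
          have hk : (c - i).toNat = (c - 1 - i).toNat + 1 := by omega
          rw [hk, pow_succ]
          congr 1
          rw [Nat.div_div_eq_div_mul, Nat.mul_comm]
        · have hcond' : ¬ (i ≤ c ∧ c - i < (pvL n : Int)) := by
            rw [hL] at *; push_cast at *; omega
          rw [if_neg hcond, if_neg hcond']

lemma largo_eq (n : Nat) : largo (n : Int) = (pvL n : Int) := by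
  have : ((n : Int)).natAbs = n := Int.natAbs_natCast n
  rw [largo, this, largoAux_eq (n + 1) n 0 (by omega)]
  ring

lemma altLen_eq_largoAux : ∀ (fuel : Nat) (y d : Int), digitoAltLen fuel y d = largoAux fuel y d := by
  intro fuel
  induction fuel with
  | zero => intro y d; rfl
  | succ f ih =>
    intro y d
    rw [digitoAltLen, largoAux]
    split <;> simp [ih]

-- ===== VERDICT (by name: the statement is the Claim_ definition above) =====
theorem digito_spec : Claim_equal_digito := by
  intro x i _ hpre
  unfold Spec_digito
  obtain ⟨n, rfl⟩ : ∃ n : Nat, x = (n : Int) := ⟨x.toNat, (Int.toNat_of_nonneg hpre).symm⟩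
  have hnat : ((n : Int)).natAbs = n := Int.natAbs_natCast n
  have hlen : digitoAltLen ((n : Int).natAbs + 1) (n : Int) 0 = (pvL n : Int) := by
    rw [altLen_eq_largoAux, hnat, largoAux_eq (n + 1) n 0 (by omega)]; ring
  rw [digito, largo_eq n, hnat, digitoLoop_eq (n + 1) n i ((pvL n : Int) - 1) (by omega)]
  rw [digito_alt]
  simp only [hlen]
  by_cases hcond : i ≤ (pvL n : Int) - 1 ∧ (pvL n : Int) - 1 - i < (pvL n : Int)
  · have hcond' : ¬ (i < 0 ∨ (pvL n : Int) ≤ i) := by omega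
    rw [if_pos hcond, if_neg hcond']
    have hpow : ((10 : Int) ^ ((pvL n : Int) - 1 - i).toNat) = ((10 ^ ((pvL n : Int) - 1 - i).toNat : Nat) : Int) := by
      push_cast; ring
    rw [hpow]
    rw [show PySem.Int.floordiv (n : Int) ((10 ^ ((pvL n : Int) - 1 - i).toNat : Nat) : Int)
          = ((n / 10 ^ ((pvL n : Int) - 1 - i).toNat : Nat) : Int) from
        PySem.Int.floordiv_natCast n _]
    exact_mod_cast (PySem.Int.mod_natCast _ 10).symm
  · have hcond' : i < 0 ∨ (pvL n : Int) ≤ i := by omega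
    rw [if_neg hcond, if_pos hcond']
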